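-- pv_equiv track=rewrite | github.com/sergioMtnezA/PK5-GUI-plugin-QGIS | meshConnectivity.py | countWalls
-- ===== SOURCE A (Python) =====
-- from collections import defaultdict
--
-- def countWalls(wall_map):
--     """
--     Count interior and boundary walls for a list of walls.
--     """
--     # Primero agrupamos las paredes por (id1, id2)
--     wall_groups = defaultdict(list)
--     for w in wall_map:
--         wall_groups[(w["id1"], w["id2"])].append(w["cell"])
--
--     n_interior = 0
--     n_boundary = 0
--     for cells in wall_groups.values():
--         if len(cells) == 2:
--             n_interior += 1
--         elif len(cells) == 1:
--             n_boundary += 1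
--
--     return n_interior, n_boundary
-- ===== SOURCE B (Python) =====
-- def countWalls(wall_map):
--     """
--     Count interior and boundary walls for a list of walls.
--
--     Single incremental pass: maintain per-(id1,id2) occurrence counts and
--     adjust the two running totals as each wall arrives.
--     """
--     counts = {}
--     n_interior = 0
--     n_boundary = 0
--     for w in wall_map:
--         key = (w["id1"], w["id2"])
--         c = counts.get(key, 0) + 1
--         counts[key] = c
--         if c == 1:
--             n_boundary += 1
--         elif c == 2:
--             n_boundary -= 1
--             n_interior += 1
--         elif c == 3:
--             n_interior -= 1
--     return n_interior, n_boundary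
-- ===== Notes on version B (the rewrite author's own statement) =====
-- stated objective: alternative
-- what changed: Replaces the two-pass group-then-tally (build lists of cells per (id1,id2), then count groups of size 1 and 2) with one incremental pass keeping only per-key counts and two running totals adjusted as each wall arrives; no cell lists are built and there is no second loop.
import Mathlib
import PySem

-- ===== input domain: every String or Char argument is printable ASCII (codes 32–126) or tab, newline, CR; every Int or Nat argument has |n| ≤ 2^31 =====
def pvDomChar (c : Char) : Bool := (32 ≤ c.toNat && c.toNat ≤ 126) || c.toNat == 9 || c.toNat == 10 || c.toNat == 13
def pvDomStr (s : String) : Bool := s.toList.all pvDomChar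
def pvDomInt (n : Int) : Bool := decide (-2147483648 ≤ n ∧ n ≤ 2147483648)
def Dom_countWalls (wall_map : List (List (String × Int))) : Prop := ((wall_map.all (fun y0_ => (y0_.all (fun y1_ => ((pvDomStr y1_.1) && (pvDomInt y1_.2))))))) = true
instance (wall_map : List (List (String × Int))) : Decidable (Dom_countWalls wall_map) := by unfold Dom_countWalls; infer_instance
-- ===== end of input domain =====

-- B replaces the group-then-tally two-pass structure with one incremental pass over the
-- walls, keeping per-(id1,id2) counts and two running totals (alternative decomposition,
-- same cost; return values only, neither program mutates its argument).

-- w["k"] : raising lookup; outside Pre_ both Pythons raise KeyError, the default 0 is never used inside Pre_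
def pvWGet (w : List (String × Int)) (k : String) : Int := (PySem.Dict.mk w).getD k 0
def pvWKey (w : List (String × Int)) : Int × Int := (pvWGet w "id1", pvWGet w "id2")

-- ===== PORT A =====
def countWalls (wall_map : List (List (String × Int))) : Int × Int :=
  let wall_groups : PySem.Dict (Int × Int) (List Int) :=
    wall_map.foldl (fun d w => d.modify (pvWKey w) [] (· ++ [pvWGet w "cell"])) PySem.Dict.empty
  wall_groups.values.foldl
    (fun acc cells =>
      if cells.length = 2 then (acc.1 + 1, acc.2)
      else if cells.length = 1 then (acc.1, acc.2 + 1)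
      else acc)
    ((0 : Int), (0 : Int))

-- ===== PORT B =====
def countWalls_alt (wall_map : List (List (String × Int))) : Int × Int :=
  let st :=
    wall_map.foldl
      (fun (st : PySem.Dict (Int × Int) Int × Int × Int) w =>
        let key := pvWKey w
        let c := st.1.getD key 0 + 1
        let counts := st.1.insert key c
        if c = 1 then (counts, st.2.1, st.2.2 + 1)
        else if c = 2 then (counts, st.2.1 + 1, st.2.2 - 1)
        else if c = 3 then (counts, st.2.1 - 1, st.2.2)
        else (counts, st.2.1, st.2.2))
      (PySem.Dict.empty, (0 : Int), (0 : Int))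
  (st.2.1, st.2.2)

-- ===== PRECONDITION & SPEC =====
-- Pre_ excludes exactly the walls missing one of the keys "id1"/"id2"/"cell",
-- on which both Pythons raise KeyError.
def Pre_countWalls (wall_map : List (List (String × Int))) : Prop :=
  (wall_map.all (fun w =>
    (PySem.Dict.mk w).contains "id1" && (PySem.Dict.mk w).contains "id2" &&
    (PySem.Dict.mk w).contains "cell")) = true
instance (wall_map : List (List (String × Int))) : Decidable (Pre_countWalls wall_map) := by
  unfold Pre_countWalls; infer_instance
def pvWitness_countWalls : (List (List (String × Int))) :=
  [[("id1", 1), ("id2", 2), ("cell", 3)], [("id1", 1), ("id2", 2), ("cell", 4)]]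
def Spec_countWalls (wall_map : List (List (String × Int))) (out : Int × Int) : Prop := out = countWalls_alt wall_map
instance (wall_map : List (List (String × Int))) (out : Int × Int) : Decidable (Spec_countWalls wall_map out) := by unfold Spec_countWalls; infer_instance

-- ===== CLAIM (what is proved, stated in full; the proofs are below) =====
def Claim_equal_countWalls : Prop := ∀ (wall_map : List (List (String × Int))), Dom_countWalls wall_map → Pre_countWalls wall_map → Spec_countWalls wall_map (countWalls wall_map)

-- ===== LEMMAS AND PROOFS =====

-- number of distinct keys of l occurring exactly n times in l
def pvF (l : List (Int × Int)) (n : Nat) : Int :=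
  (((PySem.Set.ofList l).countP (fun k => l.count k = n) : Nat) : Int)

-- B's loop body as a function of the wall's key
def pvStepK (st : PySem.Dict (Int × Int) Int × Int × Int) (key : Int × Int) :
    PySem.Dict (Int × Int) Int × Int × Int :=
  let c := st.1.getD key 0 + 1
  let counts := st.1.insert key c
  if c = 1 then (counts, st.2.1, st.2.2 + 1)
  else if c = 2 then (counts, st.2.1 + 1, st.2.2 - 1)
  else if c = 3 then (counts, st.2.1 - 1, st.2.2)
  else (counts, st.2.1, st.2.2)

lemma pvCountP_update {α : Type} [DecidableEq α] (s : List α) (x : α) (p q : α → Bool)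
    (hs : s.Nodup) (hx : x ∈ s) (hagree : ∀ a ∈ s, a ≠ x → p a = q a) :
    (s.countP p : Int) = (s.countP q : Int) + (if p x then 1 else 0) - (if q x then 1 else 0) := by
  induction s with
  | nil => simp at hx
  | cons a t ih =>
    rcases List.nodup_cons.mp hs with ⟨hat, hnt⟩
    by_cases hax : a = x
    · subst hax
      have hpq : t.countP p = t.countP q :=
        List.countP_congr (fun b hb => by
          rw [hagree b (List.mem_cons_of_mem _ hb) (fun e => hat (e ▸ hb))])
      simp only [List.countP_cons, hpq]
      push_cast
      split_ifs <;> omega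
    · have hxt : x ∈ t := by
        rcases List.mem_cons.mp hx with h | h
        · exact absurd h.symm hax
        · exact h
      have hpa : p a = q a := hagree a List.mem_cons_self hax
      have ht := ih hnt hxt (fun b hb hbx => hagree b (List.mem_cons_of_mem _ hb) hbx)
      simp only [List.countP_cons, hpa]
      push_cast at ht ⊢
      split_ifs at ht ⊢ <;> omega

lemma pvCountApp (h : List (Int × Int)) (x k : Int × Int) :
    (h ++ [x]).count k = h.count k + (if k = x then 1 else 0) := by
  rcases eq_or_ne k x with rfl | hkx
  · simp [List.count_append]
  · simp [List.count_append, List.count_eq_zero, hkx]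

lemma pvF_append (h : List (Int × Int)) (x : Int × Int) (n : Nat) (hn : 0 < n) :
    pvF (h ++ [x]) n =
      pvF h n + (if h.count x + 1 = n then 1 else 0) - (if h.count x = n then 1 else 0) := by
  unfold pvF
  rw [PySem.Set.ofList_append_singleton]
  by_cases hx : x ∈ h
  · rw [PySem.Set.add_of_mem ((PySem.Set.mem_ofList _ _).mpr hx)]
    have := pvCountP_update (PySem.Set.ofList h) x
      (fun k => decide ((h ++ [x]).count k = n)) (fun k => decide (h.count k = n))
      (PySem.Set.nodup_ofList h) ((PySem.Set.mem_ofList _ _).mpr hx)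
      (fun a _ hax => by simp [pvCountApp h x a, hax])
    rw [this]
    simp [pvCountApp h x x]
  · rw [PySem.Set.add_of_not_mem (fun hm => hx ((PySem.Set.mem_ofList _ _).mp hm))]
    rw [List.countP_append]
    have h0 : h.count x = 0 := List.count_eq_zero.mpr hx
    have hq : (PySem.Set.ofList h).countP (fun k => decide ((h ++ [x]).count k = n)) =
        (PySem.Set.ofList h).countP (fun k => decide (h.count k = n)) := by
      apply List.countP_congr
      intro a ha
      have hax : a ≠ x := fun e => hx (e ▸ (PySem.Set.mem_ofList _ _).mp ha)
      simp [pvCountApp h x a, hax]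
    rw [hq]
    simp [h0]
    split_ifs <;> omega

lemma pvBloop (l : List (Int × Int)) :
    ∀ (h : List (Int × Int)) (d : PySem.Dict (Int × Int) Int) (ni nb : Int),
      (∀ k, d.getD k 0 = (h.count k : Int)) → ni = pvF h 2 → nb = pvF h 1 →
      ((l.foldl pvStepK (d, ni, nb)).2.1, (l.foldl pvStepK (d, ni, nb)).2.2) =
        (pvF (h ++ l) 2, pvF (h ++ l) 1) := by
  induction l with
  | nil =>
    intro h d ni nb hd hni hnb
    simp [hni, hnb]
  | cons x t ih =>
    intro h d ni nb hd hni hnb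
    have hassoc : h ++ x :: t = (h ++ [x]) ++ t := by simp
    have hd' : ∀ k, (d.insert x (d.getD x 0 + 1)).getD k 0 = ((h ++ [x]).count k : Int) := by
      intro k
      rw [PySem.Dict.getD_insert, pvCountApp]
      rcases eq_or_ne k x with rfl | hkx
      · simp [hd]
      · simp [hd, hkx]
    have hF2 := pvF_append h x 2 (by norm_num)
    have hF1 := pvF_append h x 1 (by norm_num)
    simp only [List.foldl_cons, pvStepK]
    rw [hassoc]
    split_ifs with hc1 hc2 hc3
    · have h0 : h.count x = 0 := by rw [hd] at hc1; omega
      exact ih (h ++ [x]) _ _ _ hd' (by simp [h0] at hF2 hF1 ⊢; omega)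
        (by simp [h0] at hF2 hF1 ⊢; omega)
    · have h1 : h.count x = 1 := by rw [hd] at hc2; omega
      exact ih (h ++ [x]) _ _ _ hd' (by simp [h1] at hF2 hF1 ⊢; omega)
        (by simp [h1] at hF2 hF1 ⊢; omega)
    · have h2 : h.count x = 2 := by rw [hd] at hc3; omega
      exact ih (h ++ [x]) _ _ _ hd' (by simp [h2] at hF2 hF1 ⊢; omega)
        (by simp [h2] at hF2 hF1 ⊢; omega)
    · have h3 : 3 ≤ h.count x := by rw [hd] at hc1 hc2 hc3; omega
      have e1 : ¬ (h.count x + 1 = 2) := by omega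
      have e2 : ¬ (h.count x = 2) := by omega
      have e4 : ¬ (h.count x = 1) := by omega
      exact ih (h ++ [x]) _ _ _ hd' (by simp [e1, e2] at hF2 ⊢; omega)
        (by simp [e4] at hF1 ⊢; omega)

lemma pvAtally (cs : List (List Int)) : ∀ (ni nb : Int),
    cs.foldl
      (fun acc cells =>
        if cells.length = 2 then (acc.1 + 1, acc.2)
        else if cells.length = 1 then (acc.1, acc.2 + 1)
        else acc) (ni, nb) =
      (ni + (cs.countP (fun c => c.length = 2) : Nat), nb + (cs.countP (fun c => c.length = 1) : Nat)) := by
  induction cs with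
  | nil => simp
  | cons c t ih =>
    intro ni nb
    simp only [List.foldl_cons, List.countP_cons]
    split_ifs with h1 h2 <;> rw [ih] <;> simp_all <;> omega

lemma pvAchar (wm : List (List (String × Int))) :
    countWalls wm = (pvF (wm.map pvWKey) 2, pvF (wm.map pvWKey) 1) := by
  unfold countWalls
  have hkeys : (wm.foldl (fun d w => d.modify (pvWKey w) [] (· ++ [pvWGet w "cell"])) PySem.Dict.empty).keys
      = PySem.Set.ofList (wm.map pvWKey) := by
    rw [PySem.Dict.keys_foldl_modify_key wm pvWKey [] (fun _ w => (· ++ [pvWGet w "cell"]))]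
    rw [PySem.Dict.keys_empty, PySem.Set.update_nil_left]
  have hnodup : (wm.foldl (fun d w => d.modify (pvWKey w) [] (· ++ [pvWGet w "cell"])) PySem.Dict.empty).keys.Nodup :=
    PySem.Dict.nodup_keys_foldl_modify_key wm pvWKey [] (fun _ w => (· ++ [pvWGet w "cell"])) _
      (by simp [PySem.Dict.keys_empty])
  have hlen : ∀ k, ((wm.foldl (fun d w => d.modify (pvWKey w) [] (· ++ [pvWGet w "cell"])) PySem.Dict.empty).getD k []).length
      = (wm.map pvWKey).count k := by
    intro k
    have hfold : wm.foldl (fun d w => d.modify (pvWKey w) [] (· ++ [pvWGet w "cell"])) PySem.Dict.empty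
        = (wm.map (fun w => (pvWKey w, pvWGet w "cell"))).foldl (fun d p => d.modify p.1 [] (· ++ [p.2])) PySem.Dict.empty := by
      rw [List.foldl_map]
    rw [hfold, PySem.Dict.getD_foldl_modify_append, PySem.Dict.getD_empty, List.nil_append,
      List.length_map, ← List.countP_eq_length_filter, List.countP_map, List.count_eq_countP,
      List.countP_map]
    rfl
  simp only
  rw [PySem.Dict.values_eq_map_keys _ hnodup [], pvAtally, List.countP_map, List.countP_map, hkeys]
  unfold pvF
  have hcg2 : List.countP
      ((fun c => decide (c.length = 2)) ∘ (fun k => ((wm.foldl (fun d w => d.modify (pvWKey w) [] (· ++ [pvWGet w "cell"])) PySem.Dict.empty).getD k [])))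
      (PySem.Set.ofList (wm.map pvWKey))
      = List.countP (fun k => decide ((wm.map pvWKey).count k = 2)) (PySem.Set.ofList (wm.map pvWKey)) :=
    List.countP_congr (fun k _ => by simp [Function.comp, hlen k])
  have hcg1 : List.countP
      ((fun c => decide (c.length = 1)) ∘ (fun k => ((wm.foldl (fun d w => d.modify (pvWKey w) [] (· ++ [pvWGet w "cell"])) PySem.Dict.empty).getD k [])))
      (PySem.Set.ofList (wm.map pvWKey))
      = List.countP (fun k => decide ((wm.map pvWKey).count k = 1)) (PySem.Set.ofList (wm.map pvWKey)) :=
    List.countP_congr (fun k _ => by simp [Function.comp, hlen k])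
  rw [hcg2, hcg1]
  simp

lemma pvBchar (wm : List (List (String × Int))) :
    countWalls_alt wm = (pvF (wm.map pvWKey) 2, pvF (wm.map pvWKey) 1) := by
  unfold countWalls_alt
  have hbody : wm.foldl
      (fun (st : PySem.Dict (Int × Int) Int × Int × Int) w =>
        let key := pvWKey w
        let c := st.1.getD key 0 + 1
        let counts := st.1.insert key c
        if c = 1 then (counts, st.2.1, st.2.2 + 1)
        else if c = 2 then (counts, st.2.1 + 1, st.2.2 - 1)
        else if c = 3 then (counts, st.2.1 - 1, st.2.2)
        else (counts, st.2.1, st.2.2))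
      (PySem.Dict.empty, (0 : Int), (0 : Int))
      = (wm.map pvWKey).foldl pvStepK (PySem.Dict.empty, (0 : Int), (0 : Int)) := by
    rw [List.foldl_map]
    rfl
  simp only [hbody]
  exact pvBloop (wm.map pvWKey) [] PySem.Dict.empty 0 0
    (fun k => by simp [PySem.Dict.getD_empty]) (by simp [pvF]) (by simp [pvF])

-- ===== VERDICT (by name: the statement is the Claim_ definition above) =====
theorem countWalls_spec : Claim_equal_countWalls := by
  intro wm _ _
  unfold Spec_countWalls
  rw [pvAchar, pvBchar]
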